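-- pv_equiv track=rewrite | github.com/mfurga-cs/asd | inne/zawieranie_przedzialow.py | intersection
-- ===== SOURCE A (Python) =====
-- from collections import deque
--
-- def intersection(I):
--   n = len(I)
--   q = deque()
--   s = []
--
--   for i in range(n):
--     I[i] = (I[i][0], I[i][1], i)
--
--   I = sorted(I, key=lambda x: (x[0], -1 * x[1]))
--   to_remove = []
--
--   for i in range(n):
--     if len(s) == 0 or s[-1][1] < I[i][1]:
--       s.append(I[i])
--       continue
--
--     while len(s) > 0 and s[-1][1] >= I[i][1]:
--       to_remove.append(s.pop()[2])
--
--     #while len(s) > 0 and s[-1][1] < I[i][0]: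
--     #  s.pop()
--
--     s.append(I[i])
--
--   to_remove = sorted(to_remove)
--   return to_remove
-- ===== SOURCE B (Python) =====
-- def intersection(I):
--   n = len(I)
--   for i in range(n):
--     I[i] = (I[i][0], I[i][1], i)
--   J = sorted(I, key=lambda x: (x[0], -1 * x[1]))
--   removed = []
--   m = None
--   for x in reversed(J):
--     if m is not None and m <= x[1]:
--       removed.append(x[2])
--     if m is None or x[1] < m:
--       m = x[1]
--   return sorted(removed)
-- ===== Notes on version B (the rewrite author's own statement) =====
-- stated objective: simpler
-- what changed: A's monotonic stack with an inner pop-while loop is replaced by a single reverse scan over the same sorted tagged list that keeps a running minimum end and marks an interval for removal exactly when that minimum is <= its end; the tag-and-sort prelude (and the in-place tagging mutation of the argument) is kept.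
import Mathlib
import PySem

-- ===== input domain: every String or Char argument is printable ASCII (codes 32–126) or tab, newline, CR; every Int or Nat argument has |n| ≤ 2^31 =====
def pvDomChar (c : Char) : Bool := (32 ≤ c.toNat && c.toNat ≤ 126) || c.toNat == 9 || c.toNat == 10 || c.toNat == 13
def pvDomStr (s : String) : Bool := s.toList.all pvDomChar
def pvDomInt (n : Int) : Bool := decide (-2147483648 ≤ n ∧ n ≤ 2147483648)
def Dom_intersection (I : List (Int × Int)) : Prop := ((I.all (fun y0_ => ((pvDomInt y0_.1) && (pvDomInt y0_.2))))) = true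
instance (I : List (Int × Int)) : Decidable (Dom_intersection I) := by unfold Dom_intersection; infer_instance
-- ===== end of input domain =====

-- B replaces A's monotonic-stack loop by a single reverse scan with a running minimum end
-- (same tag-and-sort prelude; objective: simpler). A mutates its argument in place (tags each
-- interval with its index); the equivalence proved here is about the RETURN value only
-- (Source B performs the same mutation).

-- ===== PORT A =====
-- python stack `s` is held top-first (Lean head = python s[-1]); appends/pops at the python
-- end are conses/uncones at the Lean head, step for step.
-- the inner `while` loop of A: pop while top's end ≥ e, collecting popped tags in pop order
def aPop (e : Int) : List (Int × Int × Int) → (List (Int × Int × Int) × List Int)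
  | [] => ([], [])
  | t :: s =>
    if t.2.1 ≥ e then
      let r := aPop e s
      (r.1, t.2.2 :: r.2)
    else (t :: s, [])

-- A's main `for i in range(n)` loop over the sorted list, state = (stack, to_remove)
def aLoop : List (Int × Int × Int) → List (Int × Int × Int) → List Int → (List (Int × Int × Int) × List Int)
  | [], s, rem => (s, rem)
  | x :: L, s, rem =>
    match s with
    | [] => aLoop L (x :: []) rem
    | t :: s' =>
      if t.2.1 < x.2.1 then aLoop L (x :: t :: s') rem
      else
        let r := aPop x.2.1 (t :: s')
        aLoop L (x :: r.1) (rem ++ r.2)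

def intersection (I : List (Int × Int)) : List Int :=
  -- for i in range(n): I[i] = (I[i][0], I[i][1], i)
  let tagged := (PySem.List.enumerate I 0).map (fun p => (p.2.1, p.2.2, (p.1 : Int)))
  -- I = sorted(I, key=lambda x: (x[0], -1 * x[1]))
  let J := PySem.List.sorted2 tagged (fun x => x.1) (fun x => -1 * x.2.1) false
  let rem := (aLoop J [] []).2
  PySem.List.sorted rem (fun x => x) false

-- ===== PORT B =====
-- B's single loop over reversed(J): running minimum end `m`, collect tags whose end ≥ m
def bLoop : List (Int × Int × Int) → Option Int → List Int → List Int
  | [], _, removed => removed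
  | x :: xs, m, removed =>
    let removed' := match m with
      | some v => if v ≤ x.2.1 then removed ++ [x.2.2] else removed
      | none => removed
    let m' := match m with
      | none => some x.2.1
      | some v => if x.2.1 < v then some x.2.1 else some v
    bLoop xs m' removed'

def intersection_alt (I : List (Int × Int)) : List Int :=
  let tagged := (PySem.List.enumerate I 0).map (fun p => (p.2.1, p.2.2, (p.1 : Int)))
  let J := PySem.List.sorted2 tagged (fun x => x.1) (fun x => -1 * x.2.1) false
  let removed := bLoop J.reverse none []
  PySem.List.sorted removed (fun x => x) false

-- ===== PRECONDITION & SPEC =====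
def Spec_intersection (I : List (Int × Int)) (out : List Int) : Prop := out = intersection_alt I
instance (I : List (Int × Int)) (out : List Int) : Decidable (Spec_intersection I out) := by unfold Spec_intersection; infer_instance

-- ===== CLAIM (what is proved, stated in full; the proofs are below) =====
def Claim_equal_intersection : Prop := ∀ (I : List (Int × Int)), Dom_intersection I → Spec_intersection I (intersection I)

-- ===== LEMMAS AND PROOFS =====

-- tags of the elements that have some later element with ≤ end (the common characterization)
def bTags : List (Int × Int × Int) → List Int
  | [] => []
  | x :: L => (if L.any (fun y => decide (y.2.1 ≤ x.2.1)) then [x.2.2] else []) ++ bTags L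

-- B's loop, accumulator split off
def bLoopC : List (Int × Int × Int) → Option Int → List Int
  | [], _ => []
  | x :: xs, m =>
    (match m with
      | some v => if v ≤ x.2.1 then [x.2.2] else []
      | none => []) ++
    bLoopC xs (match m with
      | none => some x.2.1
      | some v => if x.2.1 < v then some x.2.1 else some v)

def fMin (l : List (Int × Int × Int)) (m : Option Int) : Option Int :=
  l.foldl (fun m x => match m with
    | none => some x.2.1
    | some v => if x.2.1 < v then some x.2.1 else some v) m

theorem bLoop_eq (l : List (Int × Int × Int)) : ∀ m removed, bLoop l m removed = removed ++ bLoopC l m := by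
  induction l with
  | nil => intro m removed; simp [bLoop, bLoopC]
  | cons x xs ih =>
    intro m removed
    cases m with
    | none => simp [bLoop, bLoopC, ih]
    | some v =>
      by_cases h : v ≤ x.2.1 <;> simp [bLoop, bLoopC, h, ih, List.append_assoc]

theorem bLoopC_append (l l' : List (Int × Int × Int)) : ∀ m, bLoopC (l ++ l') m = bLoopC l m ++ bLoopC l' (fMin l m) := by
  induction l with
  | nil => intro m; simp [bLoopC, fMin]
  | cons x xs ih =>
    intro m
    simp only [List.cons_append, bLoopC, ih, fMin, List.foldl_cons, List.append_assoc]

theorem fMin_le_iff (l : List (Int × Int × Int)) : ∀ m e,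
    (match fMin l m with | some v => v ≤ e | none => False) ↔
      ((match m with | some v => v ≤ e | none => False) ∨ ∃ y ∈ l, y.2.1 ≤ e) := by
  induction l with
  | nil => intro m e; simp [fMin]
  | cons x xs ih =>
    intro m e
    have hstep : fMin (x :: xs) m = fMin xs (match m with
      | none => some x.2.1
      | some v => if x.2.1 < v then some x.2.1 else some v) := by
      simp [fMin]
    rw [hstep, ih]
    cases m with
    | none =>
      simp only [List.mem_cons]
      constructor
      · rintro (h | ⟨y, hy, hle⟩)
        · exact Or.inr ⟨x, Or.inl rfl, h⟩
        · exact Or.inr ⟨y, Or.inr hy, hle⟩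
      · rintro (h | ⟨y, (rfl | hy), hle⟩)
        · exact h.elim
        · exact Or.inl hle
        · exact Or.inr ⟨y, hy, hle⟩
    | some v =>
      by_cases h : x.2.1 < v
      · simp only [h, if_pos]
        constructor
        · rintro (hle | ⟨y, hy, hle⟩)
          · exact Or.inr ⟨x, List.mem_cons_self .., hle⟩
          · exact Or.inr ⟨y, List.mem_cons_of_mem _ hy, hle⟩
        · rintro (hle | ⟨y, hy, hle⟩)
          · exact Or.inl (by omega)
          · rcases List.mem_cons.mp hy with rfl | hy
            · exact Or.inl hle
            · exact Or.inr ⟨y, hy, hle⟩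
      · simp only [h, if_neg, not_false_iff]
        constructor
        · rintro (hle | ⟨y, hy, hle⟩)
          · exact Or.inl hle
          · exact Or.inr ⟨y, List.mem_cons_of_mem _ hy, hle⟩
        · rintro (hle | ⟨y, hy, hle⟩)
          · exact Or.inl hle
          · rcases List.mem_cons.mp hy with rfl | hy
            · exact Or.inl (by omega)
            · exact Or.inr ⟨y, hy, hle⟩

theorem bLoopC_reverse_perm (L : List (Int × Int × Int)) : (bLoopC L.reverse none).Perm (bTags L) := by
  induction L with
  | nil => simp [bLoopC, bTags]
  | cons x L ih =>
    rw [List.reverse_cons, bLoopC_append]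
    have hsing : bLoopC [x] (fMin L.reverse none) =
        (if L.any (fun y => decide (y.2.1 ≤ x.2.1)) then [x.2.2] else []) := by
      have h := fMin_le_iff L.reverse none x.2.1
      simp only [false_or] at h
      cases hm : fMin L.reverse none with
      | none =>
        rw [hm] at h
        simp only [bLoopC]
        have : ¬ (L.any (fun y => decide (y.2.1 ≤ x.2.1)) = true) := by
          simp only [List.any_eq_true, decide_eq_true_eq]
          intro ⟨y, hy, hle⟩
          exact h.mpr ⟨y, by simpa using hy, hle⟩
        simp [this]
      | some v =>
        rw [hm] at h
        simp only [bLoopC, List.append_nil]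
        by_cases hv : v ≤ x.2.1
        · have : L.any (fun y => decide (y.2.1 ≤ x.2.1)) = true := by
            obtain ⟨y, hy, hle⟩ := h.mp hv
            simp only [List.any_eq_true, decide_eq_true_eq]
            exact ⟨y, by simpa using hy, hle⟩
          simp [hv, this]
        · have : ¬ (L.any (fun y => decide (y.2.1 ≤ x.2.1)) = true) := by
            simp only [List.any_eq_true, decide_eq_true_eq]
            intro ⟨y, hy, hle⟩
            exact hv (h.mpr ⟨y, by simpa using hy, hle⟩)
          simp [hv, this]
    rw [hsing]
    refine List.Perm.trans List.perm_append_comm ?_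
    simp only [bTags]
    exact List.Perm.append_left _ ih

-- the strictly-decreasing-ends stack invariant (top of stack = Lean head has the largest end)
def Decr (s : List (Int × Int × Int)) : Prop := s.Pairwise (fun a b => b.2.1 < a.2.1)

theorem aPop_eq (e : Int) (s : List (Int × Int × Int)) :
    aPop e s = (s.dropWhile (fun t => decide (e ≤ t.2.1)),
                (s.takeWhile (fun t => decide (e ≤ t.2.1))).map (fun t => t.2.2)) := by
  induction s with
  | nil => simp [aPop]
  | cons t s ih =>
    by_cases h : e ≤ t.2.1
    · simp [aPop, ge_iff_le, h, ih]
    · have h' : ¬ (t.2.1 ≥ e) := h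
      simp [aPop, h']

theorem dropWhile_lt (e : Int) (s : List (Int × Int × Int)) (hs : Decr s) :
    ∀ t ∈ s.dropWhile (fun t => decide (e ≤ t.2.1)), t.2.1 < e := by
  induction s with
  | nil => simp
  | cons h s ih =>
    rw [List.dropWhile_cons]
    by_cases hp : e ≤ h.2.1
    · simp only [hp, decide_true, if_true]
      exact ih (List.Pairwise.of_cons hs)
    · simp only [hp, decide_false]
      intro t ht
      rcases List.mem_cons.mp ht with rfl | ht
      · omega
      · have := (List.pairwise_cons.mp hs).1 t ht
        omega

theorem aLoop_step (x : Int × Int × Int) (L s : List (Int × Int × Int)) (rem : List Int) :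
    aLoop (x :: L) s rem =
      aLoop L (x :: (aPop x.2.1 s).1) (rem ++ (aPop x.2.1 s).2) := by
  match s with
  | [] => simp [aLoop, aPop]
  | t :: s' =>
    by_cases h : t.2.1 < x.2.1
    · have h' : ¬ (t.2.1 ≥ x.2.1) := by omega
      simp [aLoop, h, aPop, h']
    · simp only [aLoop, if_neg h]

theorem aLoop_perm (L : List (Int × Int × Int)) : ∀ s rem, Decr s →
    ((aLoop L s rem).2).Perm
      (rem ++ (s.filter (fun t => L.any (fun y => decide (y.2.1 ≤ t.2.1)))).map (fun t => t.2.2)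
           ++ bTags L) := by
  induction L with
  | nil =>
    intro s rem _
    simp [aLoop, bTags]
  | cons x L ih =>
    intro s rem hs
    rw [aLoop_step, aPop_eq]
    set p := fun t : Int × Int × Int => decide (x.2.1 ≤ t.2.1) with hp
    have hdecr' : Decr (x :: s.dropWhile p) := by
      refine List.pairwise_cons.mpr ⟨?_, List.Pairwise.sublist (List.dropWhile_sublist _) hs⟩
      intro t ht
      exact dropWhile_lt x.2.1 s hs t ht
    have h1 := ih (x :: s.dropWhile p) (rem ++ (s.takeWhile p).map (fun t => t.2.2)) hdecr'
    refine h1.trans ?_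
    -- rearrange the right-hand side
    have hfilter_take : (s.takeWhile p).filter (fun t => (x :: L).any (fun y => decide (y.2.1 ≤ t.2.1))) = s.takeWhile p := by
      rw [List.filter_eq_self]
      intro a ha
      have := List.mem_takeWhile_imp ha
      rw [hp] at this
      simp only [List.any_cons, Bool.or_eq_true] at this ⊢
      exact Or.inl (by simpa using this)
    have hfilter_drop : (s.dropWhile p).filter (fun t => (x :: L).any (fun y => decide (y.2.1 ≤ t.2.1)))
        = (s.dropWhile p).filter (fun t => L.any (fun y => decide (y.2.1 ≤ t.2.1))) := by
      apply List.filter_congr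
      intro a ha
      have hlt := dropWhile_lt x.2.1 s hs a ha
      have hx : decide (x.2.1 ≤ a.2.1) = false := decide_eq_false (by omega)
      simp only [List.any_cons, hx, Bool.false_or]
    have hsplit : s.filter (fun t => (x :: L).any (fun y => decide (y.2.1 ≤ t.2.1)))
        = s.takeWhile p ++ (s.dropWhile p).filter (fun t => L.any (fun y => decide (y.2.1 ≤ t.2.1))) := by
      conv_lhs => rw [← List.takeWhile_append_dropWhile (p := p) (l := s)]
      rw [List.filter_append, hfilter_take, hfilter_drop]
    rw [hsplit]
    simp only [List.filter_cons, List.map_append, bTags]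
    -- blocks: R := rem, P := tags of takeWhile, C := the conditional [x.2.2], F := filtered dropWhile tags, T := bTags L
    by_cases hc : L.any (fun y => decide (y.2.1 ≤ x.2.1))
    · simp only [hc, if_pos, List.map_cons]
      -- LHS: (R ++ P) ++ (x.2.2 :: F) ++ T   RHS: R ++ (P ++ F) ++ ([x.2.2] ++ T)
      have : ((rem ++ (s.takeWhile p).map (fun t => t.2.2)) ++
          (x.2.2 :: ((s.dropWhile p).filter (fun t => L.any (fun y => decide (y.2.1 ≤ t.2.1)))).map (fun t => t.2.2)) ++ bTags L).Perm
          (rem ++ ((s.takeWhile p).map (fun t => t.2.2) ++ ((s.dropWhile p).filter (fun t => L.any (fun y => decide (y.2.1 ≤ t.2.1)))).map (fun t => t.2.2)) ++ ([x.2.2] ++ bTags L)) := by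
        simp only [List.append_assoc, List.cons_append]
        refine List.Perm.append_left rem ?_
        refine List.Perm.append_left _ ?_
        exact List.perm_middle.symm
      simpa using this
    · simp only [Bool.not_eq_true] at hc
      simp only [hc, Bool.false_eq_true]
      simp [List.append_assoc]

theorem removed_perm (J : List (Int × Int × Int)) :
    ((aLoop J [] []).2).Perm (bLoop J.reverse none []) := by
  have hA := aLoop_perm J [] [] (by simp [Decr])
  simp only [List.filter_nil, List.map_nil, List.nil_append, List.append_nil] at hA
  rw [bLoop_eq]
  simp only [List.nil_append]
  exact hA.trans (bLoopC_reverse_perm J).symm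

-- ===== VERDICT (by name: the statement is the Claim_ definition above) =====
theorem intersection_spec : Claim_equal_intersection := by
  intro I _
  unfold Spec_intersection intersection intersection_alt
  apply (PySem.List.sorted_id_eq_sorted_id_iff_perm _ _).mpr
  exact removed_perm _
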